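-- pv_equiv track=rewrite | github.com/ziziiiiiiii/DynamicLargestSubsetPython | cecs328pa3.py | cargo
-- ===== SOURCE A (Python) =====
-- def count_items(crate):
--     # Helper function to count the number of toasters, washers, and dryers in a crate.
--     t = crate.count('t')
--     w = crate.count('w')
--     d = crate.count('d')
--     return t, w, d
--
-- def cargo(crates, T, W, D):
--     # Initialize a 3D DP table with zeros
--     dp = [[[0 for _ in range(D + 1)] for _ in range(W + 1)] for _ in range(T + 1)]
--
--     for crate in crates:
--         t, w, d = count_items(crate)
--         # Iterate from high to low to prevent overwriting
--         for i in range(T, t - 1, -1):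
--             for j in range(W, w - 1, -1):
--                 for k in range(D, d - 1, -1):
--                     if dp[i - t][j - w][k - d] + 1 > dp[i][j][k]:
--                         dp[i][j][k] = dp[i - t][j - w][k - d] + 1
--
--     return dp[T][W][D]
-- ===== SOURCE B (Python) =====
-- def count_items(crate):
--     # Helper function to count the number of toasters, washers, and dryers in a crate.
--     t = crate.count('t')
--     w = crate.count('w')
--     d = crate.count('d')
--     return t, w, d
--
--
-- def cargo(crates, T, W, D):
--     # Top-down memoized recursion over (index, remaining capacities):
--     # best(idx, i, j, k) = max crates selectable from crates[idx:] within (i, j, k).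
--     items = [count_items(c) for c in crates]
--     n = len(items)
--     memo = {}
--
--     def best(idx, i, j, k):
--         if idx == n:
--             return 0
--         key = (idx, i, j, k)
--         if key in memo:
--             return memo[key]
--         t, w, d = items[idx]
--         res = best(idx + 1, i, j, k)
--         if t <= i and w <= j and d <= k:
--             res = max(res, 1 + best(idx + 1, i - t, j - w, k - d))
--         memo[key] = res
--         return res
--
--     return best(0, T, W, D)
-- ===== Notes on version B (the rewrite author's own statement) =====
-- stated objective: faster
-- what changed: Replaced the bottom-up in-place 3D DP table (filled over the full (T+1)x(W+1)x(D+1) grid for every crate) by top-down memoized recursion on (index, remaining capacities), which visits only reachable states.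
import Mathlib
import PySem

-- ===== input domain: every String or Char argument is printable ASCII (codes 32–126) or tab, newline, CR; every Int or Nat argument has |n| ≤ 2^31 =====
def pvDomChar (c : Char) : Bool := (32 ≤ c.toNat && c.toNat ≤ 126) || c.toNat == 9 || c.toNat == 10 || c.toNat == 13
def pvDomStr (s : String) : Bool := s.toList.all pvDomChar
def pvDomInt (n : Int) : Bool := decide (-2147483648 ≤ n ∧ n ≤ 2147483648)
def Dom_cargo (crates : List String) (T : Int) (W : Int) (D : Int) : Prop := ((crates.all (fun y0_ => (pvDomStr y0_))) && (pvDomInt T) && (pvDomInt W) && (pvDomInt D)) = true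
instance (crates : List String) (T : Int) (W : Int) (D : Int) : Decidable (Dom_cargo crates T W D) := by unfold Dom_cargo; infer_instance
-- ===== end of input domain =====

-- B replaces A's bottom-up in-place 3D DP grid by top-down memoized recursion on
-- (index, remaining capacities); A raises IndexError for negative T/W/D (excluded by Pre_),
-- where B returns 0. No argument is mutated by either version.

-- ===== PORT A =====
-- count_items(crate)
def pvCountItems (crate : String) : Int × Int × Int :=
  ((PySem.Str.count crate "t" : Int), (PySem.Str.count crate "w" : Int), (PySem.Str.count crate "d" : Int))

-- dp[i][j][k] read / write on the nested table (Python lists are arrays: O(1) access).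
-- Exact for the accesses A performs: every index the loops (and, inside Pre_, the final
-- read) use is nonnegative and in range, where these are Python's dp[i][j][k].
def pvGet3 (dp : Array (Array (Array Int))) (i j k : Int) : Int :=
  if 0 ≤ i ∧ 0 ≤ j ∧ 0 ≤ k then
    (((((dp[i.toNat]?).getD #[])[j.toNat]?).getD #[])[k.toNat]?).getD 0
  else 0

def pvSet3 (dp : Array (Array (Array Int))) (i j k : Int) (v : Int) :
    Array (Array (Array Int)) :=
  if 0 ≤ i ∧ 0 ≤ j ∧ 0 ≤ k then
    dp.modify i.toNat (fun pl => pl.modify j.toNat (fun row => row.setIfInBounds k.toNat v))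
  else dp

-- [[[0 for _ in range(D+1)] for _ in range(W+1)] for _ in range(T+1)]
def pvInit (T W D : Int) : Array (Array (Array Int)) :=
  ((PySem.List.pyRange 0 (T + 1) 1).map (fun _ =>
    ((PySem.List.pyRange 0 (W + 1) 1).map (fun _ =>
      ((PySem.List.pyRange 0 (D + 1) 1).map (fun _ => (0 : Int))).toArray)).toArray)).toArray

-- one iteration of the innermost 'for k in range(D, d-1, -1)' body
def pvStepK (t w d i j : Int) (dp : Array (Array (Array Int))) (k : Int) :
    Array (Array (Array Int)) :=
  if pvGet3 dp (i - t) (j - w) (k - d) + 1 > pvGet3 dp i j k then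
    pvSet3 dp i j k (pvGet3 dp (i - t) (j - w) (k - d) + 1)
  else dp

def pvLoopK (t w d D i j : Int) (dp : Array (Array (Array Int))) : Array (Array (Array Int)) :=
  (PySem.List.pyRange D (d - 1) (-1)).foldl (pvStepK t w d i j) dp

def pvLoopJ (t w d W D i : Int) (dp : Array (Array (Array Int))) : Array (Array (Array Int)) :=
  (PySem.List.pyRange W (w - 1) (-1)).foldl (fun dp j => pvLoopK t w d D i j dp) dp

def pvLoopI (t w d T W D : Int) (dp : Array (Array (Array Int))) : Array (Array (Array Int)) :=
  (PySem.List.pyRange T (t - 1) (-1)).foldl (fun dp i => pvLoopJ t w d W D i dp) dp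

def cargo (crates : List String) (T : Int) (W : Int) (D : Int) : Int :=
  let dp := crates.foldl (fun dp crate =>
    pvLoopI (pvCountItems crate).1 (pvCountItems crate).2.1 (pvCountItems crate).2.2 T W D dp)
    (pvInit T W D)
  pvGet3 dp T W D

-- ===== PORT B =====
-- best(idx, i, j, k) with the memo dict threaded through; keys are (idx, i, j, k)
def pvBestB (items : List (Int × Int × Int)) (idx i j k : Int)
    (memo : PySem.Dict (Int × Int × Int × Int) Int) :
    Int × PySem.Dict (Int × Int × Int × Int) Int :=
  match items with
  | [] => (0, memo)
  | (t, w, d) :: rest =>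
    match memo.get? (idx, i, j, k) with
    | some v => (v, memo)
    | none =>
      let p1 := pvBestB rest (idx + 1) i j k memo
      let p2 :=
        if t ≤ i ∧ w ≤ j ∧ d ≤ k then
          let q := pvBestB rest (idx + 1) (i - t) (j - w) (k - d) p1.2
          (max p1.1 (1 + q.1), q.2)
        else p1
      (p2.1, p2.2.insert (idx, i, j, k) p2.1)

def cargo_alt (crates : List String) (T : Int) (W : Int) (D : Int) : Int :=
  (pvBestB (crates.map pvCountItems) 0 T W D PySem.Dict.empty).1

-- ===== PRECONDITION & SPEC =====
-- Pre_ excludes negative T/W/D, exactly where A raises IndexError (dp[T][W][D] on an empty axis).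
def Pre_cargo (crates : List String) (T : Int) (W : Int) (D : Int) : Prop :=
  0 ≤ T ∧ 0 ≤ W ∧ 0 ≤ D
instance (crates : List String) (T : Int) (W : Int) (D : Int) : Decidable (Pre_cargo crates T W D) := by unfold Pre_cargo; infer_instance

def pvWitness_cargo : List String × Int × Int × Int := (["tw", "d", "x"], 2, 1, 1)

def Spec_cargo (crates : List String) (T : Int) (W : Int) (D : Int) (out : Int) : Prop := out = cargo_alt crates T W D
instance (crates : List String) (T : Int) (W : Int) (D : Int) (out : Int) : Decidable (Spec_cargo crates T W D out) := by unfold Spec_cargo; infer_instance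

-- ===== CLAIM (what is proved, stated in full; the proofs are below) =====
def Claim_equal_cargo : Prop := ∀ (crates : List String) (T : Int) (W : Int) (D : Int), Dom_cargo crates T W D → Pre_cargo crates T W D → Spec_cargo crates T W D (cargo crates T W D)

-- ===== LEMMAS AND PROOFS =====

-- The common mathematical value: max number of crates from `items` fitting in (i, j, k).
def pvBest : List (Int × Int × Int) → Int → Int → Int → Int
  | [], _, _, _ => 0
  | (t, w, d) :: rest, i, j, k =>
    if t ≤ i ∧ w ≤ j ∧ d ≤ k then max (pvBest rest i j k) (1 + pvBest rest (i - t) (j - w) (k - d))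
    else pvBest rest i j k

-- pvBest also satisfies the "last element" (back-peel) recurrence (for nonnegative item counts).
theorem pvBest_append (cs : List (Int × Int × Int))
    (hcs : ∀ x ∈ cs, 0 ≤ x.1 ∧ 0 ≤ x.2.1 ∧ 0 ≤ x.2.2)
    (t w d : Int) (ht : 0 ≤ t) (hw : 0 ≤ w) (hd : 0 ≤ d) (i j k : Int) :
    pvBest (cs ++ [(t, w, d)]) i j k =
      if t ≤ i ∧ w ≤ j ∧ d ≤ k then
        max (pvBest cs i j k) (1 + pvBest cs (i - t) (j - w) (k - d))
      else pvBest cs i j k := by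
  induction cs generalizing i j k with
  | nil => simp [pvBest]
  | cons c cs ih =>
    obtain ⟨ta, wa, da⟩ := c
    obtain ⟨hta, hwa, hda⟩ := hcs (ta, wa, da) List.mem_cons_self
    have hcs' : ∀ x ∈ cs, 0 ≤ x.1 ∧ 0 ≤ x.2.1 ∧ 0 ≤ x.2.2 :=
      fun x hx => hcs x (List.mem_cons_of_mem _ hx)
    simp only [List.cons_append, pvBest]
    rw [ih hcs', ih hcs']
    split_ifs <;> simp_all [sub_right_comm] <;> omega

theorem pvPairwise_pyRange_neg_one (a b : Int) :
    (PySem.List.pyRange a b (-1)).Pairwise (fun x y => y < x) := by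
  rw [PySem.List.pyRange_neg_one_eq_reverse, List.pairwise_reverse]
  exact PySem.List.pairwise_lt_pyRange_one _ _

theorem pvCountItems_nonneg (s : String) :
    0 ≤ (pvCountItems s).1 ∧ 0 ≤ (pvCountItems s).2.1 ∧ 0 ≤ (pvCountItems s).2.2 :=
  ⟨Int.natCast_nonneg _, Int.natCast_nonneg _, Int.natCast_nonneg _⟩

-- well-formed dimensions of the DP table
def pvDims (T W D : Int) (dp : Array (Array (Array Int))) : Prop :=
  dp.size = (T + 1).toNat ∧
  ∀ (pi : Nat) (pl : Array (Array Int)), dp[pi]? = some pl →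
    pl.size = (W + 1).toNat ∧
    ∀ (pj : Nat) (row : Array Int), pl[pj]? = some row → row.size = (D + 1).toNat

theorem pvDims_init (T W D : Int) : pvDims T W D (pvInit T W D) := by
  unfold pvDims pvInit
  refine ⟨by simp [PySem.List.length_pyRange_one], ?_⟩
  intro pi pl hpl
  simp only [List.getElem?_toArray, List.getElem?_map, Option.map_eq_some_iff] at hpl
  obtain ⟨x, hx, rfl⟩ := hpl
  refine ⟨by simp [PySem.List.length_pyRange_one], ?_⟩
  intro pj row hrow
  simp only [List.getElem?_toArray, List.getElem?_map, Option.map_eq_some_iff] at hrow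
  obtain ⟨y, hy, rfl⟩ := hrow
  simp [PySem.List.length_pyRange_one]

theorem pvGet3_init (T W D a b c : Int) : pvGet3 (pvInit T W D) a b c = 0 := by
  unfold pvGet3 pvInit
  split_ifs with h
  · simp only [List.getElem?_toArray, List.getElem?_map]
    cases (PySem.List.pyRange 0 (T + 1) 1)[a.toNat]?
    · simp
    · simp only [Option.map_some, Option.getD_some, List.getElem?_toArray, List.getElem?_map]
      cases (PySem.List.pyRange 0 (W + 1) 1)[b.toNat]?
      · simp
      · simp only [Option.map_some, Option.getD_some, List.getElem?_toArray, List.getElem?_map]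
        cases (PySem.List.pyRange 0 (D + 1) 1)[c.toNat]?
        · simp
        · simp
  · rfl

theorem pvDims_set3 (T W D i j k v : Int) (dp : Array (Array (Array Int)))
    (hd : pvDims T W D dp) : pvDims T W D (pvSet3 dp i j k v) := by
  unfold pvSet3
  split_ifs with h
  · obtain ⟨hsz, hpl⟩ := hd
    refine ⟨by simpa using hsz, ?_⟩
    intro pi pl hget
    rw [Array.getElem?_modify] at hget
    by_cases he : i.toNat = pi
    · rw [if_pos he] at hget
      simp only [Option.map_eq_some_iff] at hget
      obtain ⟨pl0, hpl0, hfe⟩ := hget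
      subst hfe
      obtain ⟨hplsz, hrow⟩ := hpl pi pl0 hpl0
      refine ⟨by simpa using hplsz, ?_⟩
      intro pj row hr
      rw [Array.getElem?_modify] at hr
      by_cases he2 : j.toNat = pj
      · rw [if_pos he2] at hr
        simp only [Option.map_eq_some_iff] at hr
        obtain ⟨row0, hrow0, hfe2⟩ := hr
        subst hfe2
        simpa using hrow pj row0 hrow0
      · rw [if_neg he2] at hr
        exact hrow pj row hr
    · rw [if_neg he] at hget
      exact hpl pi pl hget
  · exact hd

theorem pvGet3_set3 (T W D i j k : Int) (dp : Array (Array (Array Int))) (v : Int)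
    (hd : pvDims T W D dp)
    (hi0 : 0 ≤ i) (hiT : i ≤ T) (hj0 : 0 ≤ j) (hjW : j ≤ W) (hk0 : 0 ≤ k) (hkD : k ≤ D)
    (a b c : Int) :
    pvGet3 (pvSet3 dp i j k v) a b c =
      if a = i ∧ b = j ∧ c = k then v else pvGet3 dp a b c := by
  obtain ⟨hsz, hplinv⟩ := hd
  unfold pvSet3
  rw [if_pos ⟨hi0, hj0, hk0⟩]
  unfold pvGet3
  by_cases hg : 0 ≤ a ∧ 0 ≤ b ∧ 0 ≤ c
  · rw [if_pos hg, if_pos hg, Array.getElem?_modify]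
    by_cases ha : a = i
    · subst ha
      have hlt : a.toNat < dp.size := by omega
      have hpl : dp[a.toNat]? = some dp[a.toNat] := Array.getElem?_eq_getElem hlt
      rw [if_pos rfl, hpl]
      simp only [Option.map_some, Option.getD_some]
      obtain ⟨hplsz, hrowinv⟩ := hplinv a.toNat _ hpl
      rw [Array.getElem?_modify]
      by_cases hb : b = j
      · subst hb
        have hlt2 : b.toNat < (dp[a.toNat]).size := by omega
        have hrow : (dp[a.toNat])[b.toNat]? = some ((dp[a.toNat])[b.toNat]) :=
          Array.getElem?_eq_getElem hlt2
        rw [if_pos rfl, hrow]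
        simp only [Option.map_some, Option.getD_some]
        have hrowsz := hrowinv b.toNat _ hrow
        by_cases hc : c = k
        · subst hc
          have hlt3 : c.toNat < ((dp[a.toNat])[b.toNat]).size := by omega
          simp [hlt3]
        · have hne : ¬(k.toNat = c.toNat) := by omega
          simp [hne, hc]
      · have hne : ¬(j.toNat = b.toNat) := by omega
        rw [if_neg hne]
        simp [hb]
    · have hne : ¬(i.toNat = a.toNat) := by omega
      rw [if_neg hne]
      simp [ha]
  · rw [if_neg hg, if_neg hg, if_neg (show ¬(a = i ∧ b = j ∧ c = k) from by
      rintro ⟨rfl, rfl, rfl⟩; exact hg ⟨hi0, hj0, hk0⟩)]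

-- pointwise description of one innermost-body step
theorem pvStepK_char (T W D t w d i j k : Int) (dp : Array (Array (Array Int)))
    (hd : pvDims T W D dp)
    (hi0 : 0 ≤ i) (hiT : i ≤ T) (hj0 : 0 ≤ j) (hjW : j ≤ W) (hk0 : 0 ≤ k) (hkD : k ≤ D) :
    pvDims T W D (pvStepK t w d i j dp k) ∧
    ∀ a b c, pvGet3 (pvStepK t w d i j dp k) a b c =
      (if a = i ∧ b = j ∧ c = k then
        max (pvGet3 dp i j k) (pvGet3 dp (i - t) (j - w) (k - d) + 1)
      else pvGet3 dp a b c) := by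
  unfold pvStepK
  split_ifs with hcond
  · refine ⟨pvDims_set3 T W D i j k _ dp hd, ?_⟩
    intro a b c
    rw [pvGet3_set3 T W D i j k dp _ ⟨hd.1, hd.2⟩ hi0 hiT hj0 hjW hk0 hkD]
    split_ifs with hkey
    · omega
    · rfl
  · refine ⟨hd, ?_⟩
    intro a b c
    split_ifs with hkey
    · obtain ⟨rfl, rfl, rfl⟩ := hkey
      omega
    · rfl

-- the innermost loop updates exactly the cells (i, j, k') with k' ∈ ks, reading old values
theorem foldl_stepK_char (T W D t w d i j : Int) (hd0 : 0 ≤ d)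
    (hi0 : 0 ≤ i) (hiT : i ≤ T) (hj0 : 0 ≤ j) (hjW : j ≤ W)
    (ks : List Int) (hks : ks.Pairwise (fun a b => b < a))
    (hksB : ∀ k ∈ ks, 0 ≤ k ∧ k ≤ D)
    (dp : Array (Array (Array Int))) (hdims : pvDims T W D dp) :
    pvDims T W D (ks.foldl (pvStepK t w d i j) dp) ∧
    ∀ a b c, pvGet3 (ks.foldl (pvStepK t w d i j) dp) a b c =
      (if a = i ∧ b = j ∧ c ∈ ks then
        max (pvGet3 dp i j c) (pvGet3 dp (i - t) (j - w) (c - d) + 1)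
      else pvGet3 dp a b c) := by
  induction ks generalizing dp with
  | nil => exact ⟨hdims, by intro a b c; simp⟩
  | cons k ks ih =>
    rw [List.pairwise_cons] at hks
    obtain ⟨hk, hks'⟩ := hks
    have hkb := hksB k List.mem_cons_self
    have hksB' : ∀ x ∈ ks, 0 ≤ x ∧ x ≤ D := fun x hx => hksB x (List.mem_cons_of_mem _ hx)
    obtain ⟨hdims1, hstep⟩ :=
      pvStepK_char T W D t w d i j k dp hdims hi0 hiT hj0 hjW hkb.1 hkb.2
    obtain ⟨hdims2, hvals⟩ := ih hks' hksB' (pvStepK t w d i j dp k) hdims1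
    refine ⟨by simpa [List.foldl_cons] using hdims2, ?_⟩
    intro a b c
    simp only [List.foldl_cons]
    rw [hvals a b c]
    simp only [hstep]
    by_cases hmem : c ∈ ks
    · have h2 : c ≠ k := by have := hk c hmem; omega
      have h3 : c - d ≠ k := by have := hk c hmem; omega
      simp [hmem, h2, h3, List.mem_cons]
    · by_cases hck : c = k
      · subst hck
        simp [hmem]
      · simp [hmem, hck, List.mem_cons]

-- the middle loop: lines (i, j', ·) for j' ∈ js, still reading pre-crate values
theorem foldl_loopK_char (T W D t w d i : Int) (hw0 : 0 ≤ w) (hd0 : 0 ≤ d)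
    (hi0 : 0 ≤ i) (hiT : i ≤ T)
    (js : List Int) (hjs : js.Pairwise (fun a b => b < a))
    (hjsB : ∀ j ∈ js, 0 ≤ j ∧ j ≤ W)
    (dp : Array (Array (Array Int))) (hdims : pvDims T W D dp) :
    pvDims T W D (js.foldl (fun dp j => pvLoopK t w d D i j dp) dp) ∧
    ∀ a b c, pvGet3 (js.foldl (fun dp j => pvLoopK t w d D i j dp) dp) a b c =
      (if a = i ∧ b ∈ js ∧ (d - 1 < c ∧ c ≤ D) then
        max (pvGet3 dp i b c) (pvGet3 dp (i - t) (b - w) (c - d) + 1)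
      else pvGet3 dp a b c) := by
  induction js generalizing dp with
  | nil => exact ⟨hdims, by intro a b c; simp⟩
  | cons j js ih =>
    rw [List.pairwise_cons] at hjs
    obtain ⟨hj, hjs'⟩ := hjs
    have hjb := hjsB j List.mem_cons_self
    have hjsB' : ∀ x ∈ js, 0 ≤ x ∧ x ≤ W := fun x hx => hjsB x (List.mem_cons_of_mem _ hx)
    have hksB : ∀ k ∈ PySem.List.pyRange D (d - 1) (-1), 0 ≤ k ∧ k ≤ D := by
      intro k hk
      rw [PySem.List.mem_pyRange_neg_one] at hk
      omega
    obtain ⟨hdims1, hstep⟩ :=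
      foldl_stepK_char T W D t w d i j hd0 hi0 hiT hjb.1 hjb.2 _
        (pvPairwise_pyRange_neg_one D (d - 1)) hksB dp hdims
    simp only [PySem.List.mem_pyRange_neg_one] at hstep
    obtain ⟨hdims2, hvals⟩ := ih hjs' hjsB' (pvLoopK t w d D i j dp) hdims1
    refine ⟨by simpa [List.foldl_cons, pvLoopK] using hdims2, ?_⟩
    intro a b c
    simp only [List.foldl_cons]
    rw [hvals a b c]
    have hstep' : ∀ a b c, pvGet3 (pvLoopK t w d D i j dp) a b c =
        (if a = i ∧ b = j ∧ (d - 1 < c ∧ c ≤ D) then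
          max (pvGet3 dp i j c) (pvGet3 dp (i - t) (j - w) (c - d) + 1)
        else pvGet3 dp a b c) := by
      intro a b c
      rw [pvLoopK, hstep a b c]
    simp only [hstep']
    by_cases hmem : b ∈ js
    · have h2 : b ≠ j := by have := hj b hmem; omega
      have h3 : ¬(b - w = j) := by have := hj b hmem; omega
      simp [hmem, h2, h3, List.mem_cons]
    · by_cases hbj : b = j
      · subst hbj
        simp [hmem]
      · simp [hmem, hbj, List.mem_cons]

-- the outer loop: the whole crate update, reading pre-crate values
theorem foldl_loopJ_char (T W D t w d : Int) (ht0 : 0 ≤ t) (hw0 : 0 ≤ w) (hd0 : 0 ≤ d)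
    (is : List Int) (his : is.Pairwise (fun a b => b < a))
    (hisB : ∀ i ∈ is, 0 ≤ i ∧ i ≤ T)
    (dp : Array (Array (Array Int))) (hdims : pvDims T W D dp) :
    pvDims T W D (is.foldl (fun dp i => pvLoopJ t w d W D i dp) dp) ∧
    ∀ a b c, pvGet3 (is.foldl (fun dp i => pvLoopJ t w d W D i dp) dp) a b c =
      (if a ∈ is ∧ (w - 1 < b ∧ b ≤ W) ∧ (d - 1 < c ∧ c ≤ D) then
        max (pvGet3 dp a b c) (pvGet3 dp (a - t) (b - w) (c - d) + 1)
      else pvGet3 dp a b c) := by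
  induction is generalizing dp with
  | nil => exact ⟨hdims, by intro a b c; simp⟩
  | cons i is ih =>
    rw [List.pairwise_cons] at his
    obtain ⟨hi, his'⟩ := his
    have hib := hisB i List.mem_cons_self
    have hisB' : ∀ x ∈ is, 0 ≤ x ∧ x ≤ T := fun x hx => hisB x (List.mem_cons_of_mem _ hx)
    have hjsB : ∀ j ∈ PySem.List.pyRange W (w - 1) (-1), 0 ≤ j ∧ j ≤ W := by
      intro j hj
      rw [PySem.List.mem_pyRange_neg_one] at hj
      omega
    obtain ⟨hdims1, hstep⟩ :=
      foldl_loopK_char T W D t w d i hw0 hd0 hib.1 hib.2 _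
        (pvPairwise_pyRange_neg_one W (w - 1)) hjsB dp hdims
    simp only [PySem.List.mem_pyRange_neg_one] at hstep
    obtain ⟨hdims2, hvals⟩ := ih his' hisB' (pvLoopJ t w d W D i dp) hdims1
    refine ⟨by simpa [List.foldl_cons, pvLoopJ] using hdims2, ?_⟩
    intro a b c
    simp only [List.foldl_cons]
    rw [hvals a b c]
    have hstep' : ∀ a b c, pvGet3 (pvLoopJ t w d W D i dp) a b c =
        (if a = i ∧ (w - 1 < b ∧ b ≤ W) ∧ (d - 1 < c ∧ c ≤ D) then
          max (pvGet3 dp i b c) (pvGet3 dp (i - t) (b - w) (c - d) + 1)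
        else pvGet3 dp a b c) := by
      intro a b c
      rw [pvLoopJ, hstep a b c]
    simp only [hstep']
    by_cases hmem : a ∈ is
    · have h2 : a ≠ i := by have := hi a hmem; omega
      have h3 : ¬(a - t = i) := by have := hi a hmem; omega
      simp [hmem, h2, h3, List.mem_cons]
    · by_cases hai : a = i
      · subst hai
        simp [hmem]
      · simp [hmem, hai, List.mem_cons]

theorem pvLoopI_char (T W D t w d : Int) (ht0 : 0 ≤ t) (hw0 : 0 ≤ w) (hd0 : 0 ≤ d)
    (dp : Array (Array (Array Int))) (hdims : pvDims T W D dp) :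
    pvDims T W D (pvLoopI t w d T W D dp) ∧
    ∀ a b c, pvGet3 (pvLoopI t w d T W D dp) a b c =
      (if (t - 1 < a ∧ a ≤ T) ∧ (w - 1 < b ∧ b ≤ W) ∧ (d - 1 < c ∧ c ≤ D) then
        max (pvGet3 dp a b c) (pvGet3 dp (a - t) (b - w) (c - d) + 1)
      else pvGet3 dp a b c) := by
  have hisB : ∀ i ∈ PySem.List.pyRange T (t - 1) (-1), 0 ≤ i ∧ i ≤ T := by
    intro i hixx
    rw [PySem.List.mem_pyRange_neg_one] at hixx
    omega
  obtain ⟨hdims1, hvals⟩ :=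
    foldl_loopJ_char T W D t w d ht0 hw0 hd0 _
      (pvPairwise_pyRange_neg_one T (t - 1)) hisB dp hdims
  refine ⟨by simpa [pvLoopI] using hdims1, ?_⟩
  intro a b c
  rw [pvLoopI, hvals a b c]
  simp [PySem.List.mem_pyRange_neg_one]

-- A's fold keeps the table well-formed and computes pvBest on every in-range cell
theorem cargo_fold_char (T W D : Int) (cs : List String) :
    pvDims T W D (cs.foldl (fun dp crate =>
      pvLoopI (pvCountItems crate).1 (pvCountItems crate).2.1 (pvCountItems crate).2.2 T W D dp)
      (pvInit T W D)) ∧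
    ∀ i j k, 0 ≤ i → i ≤ T → 0 ≤ j → j ≤ W → 0 ≤ k → k ≤ D →
      pvGet3 (cs.foldl (fun dp crate =>
        pvLoopI (pvCountItems crate).1 (pvCountItems crate).2.1 (pvCountItems crate).2.2 T W D dp)
        (pvInit T W D)) i j k =
        pvBest (cs.map pvCountItems) i j k := by
  induction cs using List.reverseRecOn with
  | nil =>
    exact ⟨pvDims_init T W D, by
      intro i j k _ _ _ _ _ _
      simp [pvGet3_init, pvBest]⟩
  | append_singleton cs crate ih =>
    obtain ⟨ihdims, ihvals⟩ := ih
    rw [List.foldl_append, List.foldl_cons, List.foldl_nil]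
    have hnn := pvCountItems_nonneg crate
    obtain ⟨hdims1, hvals⟩ := pvLoopI_char T W D _ _ _ hnn.1 hnn.2.1 hnn.2.2 _ ihdims
    refine ⟨hdims1, ?_⟩
    intro i j k hi0 hiT hj0 hjW hk0 hkD
    have hmap : List.map pvCountItems (cs ++ [crate]) =
        List.map pvCountItems cs ++
          [((pvCountItems crate).1, (pvCountItems crate).2.1, (pvCountItems crate).2.2)] := by
      simp
    rw [hmap, hvals i j k,
        pvBest_append _ (by
          rintro x hx
          obtain ⟨s, -, rfl⟩ := List.mem_map.mp hx
          exact pvCountItems_nonneg s) _ _ _ hnn.1 hnn.2.1 hnn.2.2]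
    have h1 := hnn.1
    have h2 := hnn.2.1
    have h3 := hnn.2.2
    by_cases hfit : (pvCountItems crate).1 ≤ i ∧ (pvCountItems crate).2.1 ≤ j ∧
        (pvCountItems crate).2.2 ≤ k
    · rw [if_pos ⟨⟨by omega, hiT⟩, ⟨by omega, hjW⟩, ⟨by omega, hkD⟩⟩, if_pos hfit]
      rw [ihvals i j k hi0 hiT hj0 hjW hk0 hkD,
          ihvals (i - (pvCountItems crate).1) (j - (pvCountItems crate).2.1)
            (k - (pvCountItems crate).2.2) (by omega) (by omega) (by omega) (by omega) (by omega)
            (by omega)]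
      omega
    · rw [if_neg (by rintro ⟨⟨hh1, -⟩, ⟨hh2, -⟩, ⟨hh3, -⟩⟩; exact hfit ⟨by omega, by omega, by omega⟩),
          if_neg hfit]
      exact ihvals i j k hi0 hiT hj0 hjW hk0 hkD

def pvMemoOK (items : List (Int × Int × Int))
    (memo : PySem.Dict (Int × Int × Int × Int) Int) : Prop :=
  ∀ n i j k v, memo.get? (n, i, j, k) = some v → v = pvBest (items.drop n.toNat) i j k

theorem pvBestB_correct (items : List (Int × Int × Int)) (suffix : List (Int × Int × Int)) :
    ∀ (idx : Int), 0 ≤ idx → items.drop idx.toNat = suffix →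
      ∀ i j k memo, pvMemoOK items memo →
        (pvBestB suffix idx i j k memo).1 = pvBest suffix i j k ∧
        pvMemoOK items (pvBestB suffix idx i j k memo).2 := by
  induction suffix with
  | nil =>
    intro idx _ _ i j k memo hm
    exact ⟨by simp [pvBestB, pvBest], by simpa [pvBestB] using hm⟩
  | cons c rest ih =>
    obtain ⟨t, w, d⟩ := c
    intro idx hidx hdrop i j k memo hm
    have hdrop' : items.drop (idx + 1).toNat = rest := by
      have h1 : (idx + 1).toNat = idx.toNat + 1 := by omega
      rw [h1, ← List.drop_drop, hdrop]
      simp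
    cases hget : memo.get? (idx, i, j, k) with
    | some v =>
      have hv := hm idx i j k v hget
      rw [hdrop] at hv
      simp only [pvBestB, hget]
      exact ⟨hv, hm⟩
    | none =>
      obtain ⟨h1, hm1⟩ := ih (idx + 1) (by omega) hdrop' i j k memo hm
      by_cases hfit : t ≤ i ∧ w ≤ j ∧ d ≤ k
      · obtain ⟨h2, hm2⟩ := ih (idx + 1) (by omega) hdrop' (i - t) (j - w) (k - d)
          (pvBestB rest (idx + 1) i j k memo).2 hm1
        have hres : (pvBestB ((t, w, d) :: rest) idx i j k memo).1 =
            pvBest ((t, w, d) :: rest) i j k := by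
          simp only [pvBestB, hget, if_pos hfit, pvBest, h1, h2]
        refine ⟨hres, ?_⟩
        intro n a b c v hv
        simp only [pvBestB, hget, if_pos hfit] at hv ⊢
        rw [PySem.Dict.get?_insert] at hv
        by_cases hkey : ((n, a, b, c) : Int × Int × Int × Int) = (idx, i, j, k)
        · rw [if_pos hkey] at hv
          simp only [Prod.mk.injEq] at hkey
          obtain ⟨hn, ha, hb, hc2⟩ := hkey
          subst hn; subst ha; subst hb; subst hc2
          rw [hdrop, ← hres]
          simp only [pvBestB, hget, if_pos hfit]
          exact (Option.some.inj hv).symm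
        · rw [if_neg hkey] at hv
          exact hm2 n a b c v hv
      · have hres : (pvBestB ((t, w, d) :: rest) idx i j k memo).1 =
            pvBest ((t, w, d) :: rest) i j k := by
          simp only [pvBestB, hget, if_neg hfit, pvBest, h1]
        refine ⟨hres, ?_⟩
        intro n a b c v hv
        simp only [pvBestB, hget, if_neg hfit] at hv
        rw [PySem.Dict.get?_insert] at hv
        by_cases hkey : ((n, a, b, c) : Int × Int × Int × Int) = (idx, i, j, k)
        · rw [if_pos hkey] at hv
          simp only [Prod.mk.injEq] at hkey
          obtain ⟨hn, ha, hb, hc2⟩ := hkey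
          subst hn; subst ha; subst hb; subst hc2
          rw [hdrop, ← hres]
          simp only [pvBestB, hget, if_neg hfit]
          exact (Option.some.inj hv).symm
        · rw [if_neg hkey] at hv
          exact hm1 n a b c v hv

-- ===== VERDICT (by name: the statement is the Claim_ definition above) =====
theorem cargo_spec : Claim_equal_cargo := by
  intro crates T W D _ hpre
  obtain ⟨hT, hW, hD⟩ := hpre
  unfold Spec_cargo cargo cargo_alt
  show pvGet3 (crates.foldl (fun dp crate =>
      pvLoopI (pvCountItems crate).1 (pvCountItems crate).2.1 (pvCountItems crate).2.2 T W D dp)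
      (pvInit T W D)) T W D = (pvBestB (crates.map pvCountItems) 0 T W D PySem.Dict.empty).1
  rw [(cargo_fold_char T W D crates).2 T W D hT le_rfl hW le_rfl hD le_rfl]
  obtain ⟨hB, _⟩ := pvBestB_correct (crates.map pvCountItems) (crates.map pvCountItems) 0
    le_rfl (by simp) T W D PySem.Dict.empty
    (by intro n a b c v hv; simp [PySem.Dict.get?_empty] at hv)
  exact hB.symm
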